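-- pv_equiv track=rewrite | github.com/nevinanilkumar/main-project | ocr.py | correctToNumbers
-- ===== SOURCE A (Python) =====
-- def correctToNumbers(text):
--     for i in range(len(text)):
--       if text[i]=="S":
--          text=text.replace("S","5")
--       elif text[i]=="Z":
--          text=text.replace("Z","2")
--       elif text[i]=="A":
--          text=text.replace("A","4")
--       elif text[i]=="B":
--          text=text.replace("B","8")
--       elif text[i]=="I":
--          text=text.replace("I","1")
--       elif text[i]=="O":
--          text=text.replace("O","0")
--       elif text[i]=="T":
--          text=text.replace("T","1")
--     return text
-- ===== SOURCE B (Python) =====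
-- _MAPPING = {'S': '5', 'Z': '2', 'A': '4', 'B': '8', 'I': '1', 'O': '0', 'T': '1'}
--
-- def correctToNumbers(text):
--     return ''.join(_MAPPING.get(c, c) for c in text)
-- ===== Notes on version B (the rewrite author's own statement) =====
-- stated objective: faster
-- what changed: A repeatedly rescans and rebuilds the whole string with str.replace inside an index loop; B builds a fixed letter-to-digit dict once and produces the result in a single character pass with a join, which is correct because no replacement digit is itself a mapped letter.
import Mathlib
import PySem

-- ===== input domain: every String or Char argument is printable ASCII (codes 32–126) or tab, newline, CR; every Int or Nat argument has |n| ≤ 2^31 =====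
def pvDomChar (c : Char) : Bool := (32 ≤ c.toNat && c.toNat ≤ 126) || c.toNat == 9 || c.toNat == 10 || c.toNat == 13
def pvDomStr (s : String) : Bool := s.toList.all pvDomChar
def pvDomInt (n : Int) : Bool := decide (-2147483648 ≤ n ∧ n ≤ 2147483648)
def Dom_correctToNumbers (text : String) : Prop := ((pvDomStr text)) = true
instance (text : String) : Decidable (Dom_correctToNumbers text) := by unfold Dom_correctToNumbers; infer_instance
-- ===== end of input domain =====

-- B replaces A's repeated full-string str.replace scans with one table-lookup pass; return value proved equal.


-- ===== PORT A =====
-- one iteration of A's loop body (text[i] then the elif chain of str.replace calls);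
-- the 'none' branch is unreachable: every replace keeps the length, so i stays in range
def correctToNumbersStep (cs : List Char) (i : Int) : List Char :=
  match PySem.List.pyGet? cs i with
  | none => cs
  | some c =>
    if c = 'S' then PySem.Chars.replace cs ['S'] ['5']
    else if c = 'Z' then PySem.Chars.replace cs ['Z'] ['2']
    else if c = 'A' then PySem.Chars.replace cs ['A'] ['4']
    else if c = 'B' then PySem.Chars.replace cs ['B'] ['8']
    else if c = 'I' then PySem.Chars.replace cs ['I'] ['1']
    else if c = 'O' then PySem.Chars.replace cs ['O'] ['0']
    else if c = 'T' then PySem.Chars.replace cs ['T'] ['1']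
    else cs

def correctToNumbers (text : String) : String :=
  String.mk ((PySem.List.pyRange 0 (PySem.Chars.len text.toList)).foldl correctToNumbersStep text.toList)

-- ===== PORT B =====
-- the module-level dict literal _MAPPING
def pvMapping : PySem.Dict Char Char :=
  PySem.Dict.mk [('S', '5'), ('Z', '2'), ('A', '4'), ('B', '8'), ('I', '1'), ('O', '0'), ('T', '1')]

-- ''.join(_MAPPING.get(c, c) for c in text)
def correctToNumbers_alt (text : String) : String :=
  String.mk (text.toList.map (fun c => (pvMapping.get? c).getD c))

-- ===== PRECONDITION & SPEC =====
def Spec_correctToNumbers (text : String) (out : String) : Prop := out = correctToNumbers_alt text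
instance (text : String) (out : String) : Decidable (Spec_correctToNumbers text out) := by unfold Spec_correctToNumbers; infer_instance

-- ===== CLAIM (what is proved, stated in full; the proofs are below) =====
def Claim_equal_correctToNumbers : Prop := ∀ (text : String), Dom_correctToNumbers text → Spec_correctToNumbers text (correctToNumbers text)

-- ===== LEMMAS AND PROOFS =====

-- the letter→digit substitution as a plain function
def pvF (c : Char) : Char :=
  if c = 'S' then '5' else if c = 'Z' then '2' else if c = 'A' then '4'
  else if c = 'B' then '8' else if c = 'I' then '1' else if c = 'O' then '0'
  else if c = 'T' then '1' else c

def pvIsLetter (c : Char) : Bool :=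
  c = 'S' || c = 'Z' || c = 'A' || c = 'B' || c = 'I' || c = 'O' || c = 'T'

def pvRepl (L d c : Char) : Char := if c = L then d else c

-- partial substitution: letters in R already replaced
def pvH (R : Char → Bool) (c : Char) : Char := if R c then pvF c else c

lemma pvF_not_letter {c : Char} (h : pvIsLetter c = true) : pvIsLetter (pvF c) = false := by
  simp only [pvIsLetter, Bool.or_eq_true, decide_eq_true_eq] at h
  rcases h with ((((((h|h)|h)|h)|h)|h)|h) <;> subst h <;> decide

lemma pvF_of_not_letter {c : Char} (h : pvIsLetter c = false) : pvF c = c := by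
  simp only [pvIsLetter, Bool.or_eq_false_iff, decide_eq_false_iff_not] at h
  simp [pvF, h.1.1.1.1.1.1, h.1.1.1.1.1.2, h.1.1.1.1.2, h.1.1.1.2, h.1.1.2, h.1.2, h.2]

-- single-character str.replace is a map
lemma replace_go_single (L d : Char) :
    ∀ (l : List Char) (fuel : Nat) (acc : List Char), l.length ≤ fuel →
      PySem.Chars.replace.go [L] [d] fuel l acc = acc.reverse ++ l.map (pvRepl L d) := by
  intro l
  induction l with
  | nil => intro fuel acc _; rw [PySem.Chars.replace.go.eq_def]; cases fuel <;> simp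
  | cons c t ih =>
    intro fuel acc hf
    cases fuel with
    | zero => simp at hf
    | succ fuel =>
      simp only [List.length_cons] at hf
      by_cases hc : c = L
      · subst hc
        have hgo : PySem.Chars.replace.go [c] [d] (fuel + 1) (c :: t) acc
            = PySem.Chars.replace.go [c] [d] fuel t (d :: acc) := by
          rw [PySem.Chars.replace.go.eq_def]
          simp [List.isPrefixOf]
        rw [hgo, ih fuel (d :: acc) (by omega)]
        simp [pvRepl]
      · have hbeq : (L == c) = false := by
          simp only [beq_eq_false_iff_ne, ne_eq]
          exact fun h => hc h.symm
        have hgo : PySem.Chars.replace.go [L] [d] (fuel + 1) (c :: t) acc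
            = PySem.Chars.replace.go [L] [d] fuel t (c :: acc) := by
          rw [PySem.Chars.replace.go.eq_def]
          simp [List.isPrefixOf, hbeq]
        rw [hgo, ih fuel (c :: acc) (by omega)]
        simp [pvRepl, hc]

lemma replace_single (s : List Char) (L d : Char) :
    PySem.Chars.replace s [L] [d] = s.map (pvRepl L d) := by
  rw [PySem.Chars.replace]
  simp only [List.isEmpty_cons, if_neg Bool.false_ne_true]
  rw [replace_go_single L d s s.length [] le_rfl]
  simp

-- one replacement folded into the partial substitution
lemma repl_comp (R : Char → Bool) (hR : ∀ c, R c = true → pvIsLetter c = true)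
    (L d : Char) (hL : pvIsLetter L = true) (hFd : pvF L = d) (hd : pvIsLetter d = false) :
    ∀ c, pvRepl L d (pvH R c) = pvH (fun x => R x || x = L) c := by
  intro c
  by_cases hRc : R c = true
  · have hdig : pvIsLetter (pvF c) = false := pvF_not_letter (hR c hRc)
    have hne : pvF c ≠ L := by intro h; rw [h, hL] at hdig; cases hdig
    simp [pvH, pvRepl, hRc, hne]
  · by_cases hcL : c = L
    · subst hcL; simp [pvH, pvRepl, hRc, hFd]
    · simp [pvH, pvRepl, hRc, hcL]

-- the loop invariant: after the indices below k have been examined, the state is a partial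
-- substitution whose replaced set covers every letter occurring below k; the remaining
-- iterations complete it to the full substitution pvF
lemma loop_inv (s0 : List Char) :
    ∀ (k : Nat) (R : Char → Bool),
      (∀ c, R c = true → pvIsLetter c = true) →
      (∀ j (hj : j < s0.length), j < k → pvIsLetter s0[j] = true → R s0[j] = true) →
      (PySem.List.pyRange (k : Int) (s0.length : Int)).foldl correctToNumbersStep (s0.map (pvH R))
        = s0.map pvF := by
  intro k R
  induction hk : s0.length - k generalizing k R with
  | zero =>
    intro hRlet hcov
    have hge : s0.length ≤ k := by omega
    have : ¬ ((k : Int) < (s0.length : Int)) := by exact_mod_cast Nat.not_lt.mpr hge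
    rw [show PySem.List.pyRange (k : Int) (s0.length : Int) = [] from by
      simp [PySem.List.pyRange]; omega]
    simp only [List.foldl_nil]
    apply List.map_congr_left
    intro c hc
    obtain ⟨j, hj, rfl⟩ := List.mem_iff_getElem.mp hc
    by_cases hl : pvIsLetter s0[j] = true
    · simp [pvH, hcov j hj (by omega) hl]
    · have hc' : pvIsLetter s0[j] = false := Bool.eq_false_iff.mpr hl
      by_cases hRs : R s0[j] = true
      · exact absurd (hRlet _ hRs) hl
      · simp [pvH, hRs, pvF_of_not_letter hc']
  | succ n ih =>
    intro hRlet hcov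
    have hlt : k < s0.length := by omega
    rw [PySem.List.pyRange_one_cons (by exact_mod_cast hlt)]
    simp only [List.foldl_cons]
    have hget : PySem.List.pyGet? (s0.map (pvH R)) (k : Int) = some (pvH R s0[k]) := by
      rw [PySem.List.pyGet?_natCast]
      simp [List.getElem?_map, List.getElem?_eq_getElem hlt]
    set c := pvH R s0[k] with hc
    have step_eq : ∀ (L d : Char), pvIsLetter L = true → pvF L = d → pvIsLetter d = false →
        c = L →
        PySem.Chars.replace (s0.map (pvH R)) [L] [d]
          = s0.map (pvH (fun x => R x || x = L)) := by
      intro L d hL hFd hd hcL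
      rw [replace_single, List.map_map]
      apply List.map_congr_left
      intro x _
      exact repl_comp R hRlet L d hL hFd hd x
    have cover_succ : ∀ (L : Char), c = L →
        ∀ j (hj : j < s0.length), j < k + 1 → pvIsLetter s0[j] = true →
          (R s0[j] || s0[j] = L) = true := by
      intro L hcL j hj hjk hlet
      by_cases hjk' : j < k
      · simp [hcov j hj hjk' hlet]
      · have : j = k := by omega
        subst this
        by_cases hRj : R s0[j] = true
        · simp [hRj]
        · have : c = s0[j] := by simp [hc, pvH, hRj]
          simp [← hcL, this]
    have letters_succ : ∀ (L : Char), pvIsLetter L = true →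
        ∀ x, (R x || x = L) = true → pvIsLetter x = true := by
      intro L hL x hx
      rcases Bool.or_eq_true_iff.mp hx with h | h
      · exact hRlet x h
      · rw [decide_eq_true_eq.mp h]; exact hL
    have hks : ((k : Int) + 1) = ((k + 1 : Nat) : Int) := by push_cast; ring
    rw [hks]
    simp only [correctToNumbersStep, hget]
    by_cases h1 : c = 'S'
    · rw [if_pos h1, step_eq 'S' '5' (by decide) (by decide) (by decide) h1]
      exact ih (k+1) _ (by omega) (letters_succ 'S' (by decide)) (cover_succ 'S' h1)
    rw [if_neg h1]
    by_cases h2 : c = 'Z'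
    · rw [if_pos h2, step_eq 'Z' '2' (by decide) (by decide) (by decide) h2]
      exact ih (k+1) _ (by omega) (letters_succ 'Z' (by decide)) (cover_succ 'Z' h2)
    rw [if_neg h2]
    by_cases h3 : c = 'A'
    · rw [if_pos h3, step_eq 'A' '4' (by decide) (by decide) (by decide) h3]
      exact ih (k+1) _ (by omega) (letters_succ 'A' (by decide)) (cover_succ 'A' h3)
    rw [if_neg h3]
    by_cases h4 : c = 'B'
    · rw [if_pos h4, step_eq 'B' '8' (by decide) (by decide) (by decide) h4]
      exact ih (k+1) _ (by omega) (letters_succ 'B' (by decide)) (cover_succ 'B' h4)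
    rw [if_neg h4]
    by_cases h5 : c = 'I'
    · rw [if_pos h5, step_eq 'I' '1' (by decide) (by decide) (by decide) h5]
      exact ih (k+1) _ (by omega) (letters_succ 'I' (by decide)) (cover_succ 'I' h5)
    rw [if_neg h5]
    by_cases h6 : c = 'O'
    · rw [if_pos h6, step_eq 'O' '0' (by decide) (by decide) (by decide) h6]
      exact ih (k+1) _ (by omega) (letters_succ 'O' (by decide)) (cover_succ 'O' h6)
    rw [if_neg h6]
    by_cases h7 : c = 'T'
    · rw [if_pos h7, step_eq 'T' '1' (by decide) (by decide) (by decide) h7]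
      exact ih (k+1) _ (by omega) (letters_succ 'T' (by decide)) (cover_succ 'T' h7)
    rw [if_neg h7]
    -- no replacement: the letter (if any) at k must already be in R
    have hcov' : ∀ j (hj : j < s0.length), j < k + 1 → pvIsLetter s0[j] = true → R s0[j] = true := by
      intro j hj hjk hlet
      by_cases hjk' : j < k
      · exact hcov j hj hjk' hlet
      · have : j = k := by omega
        subst this
        by_cases hRj : R s0[j] = true
        · exact hRj
        · exfalso
          have hcj : c = s0[j] := by simp [hc, pvH, hRj]
          rw [hcj] at h1 h2 h3 h4 h5 h6 h7
          simp only [pvIsLetter, Bool.or_eq_true, decide_eq_true_eq] at hlet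
          rcases hlet with ((((((h|h)|h)|h)|h)|h)|h)
          exacts [h1 h, h2 h, h3 h, h4 h, h5 h, h6 h, h7 h]
    exact ih (k+1) R (by omega) hRlet hcov'

-- B's dict lookup is the substitution pvF
lemma getD_mapping (c : Char) : (pvMapping.get? c).getD c = pvF c := by
  by_cases h1 : c = 'S'; · subst h1; decide
  by_cases h2 : c = 'Z'; · subst h2; decide
  by_cases h3 : c = 'A'; · subst h3; decide
  by_cases h4 : c = 'B'; · subst h4; decide
  by_cases h5 : c = 'I'; · subst h5; decide
  by_cases h6 : c = 'O'; · subst h6; decide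
  by_cases h7 : c = 'T'; · subst h7; decide
  have hnone : pvMapping.get? c = none := by
    simp only [pvMapping, PySem.Dict.get?]
    rw [List.find?_eq_none.mpr]
    · rfl
    · intro x hx
      fin_cases hx <;> simp only [beq_iff_eq] <;> intro h <;>
        first
        | exact h1 h.symm | exact h2 h.symm | exact h3 h.symm | exact h4 h.symm
        | exact h5 h.symm | exact h6 h.symm | exact h7 h.symm
  rw [hnone]
  simp [pvF, h1, h2, h3, h4, h5, h6, h7]

-- ===== VERDICT (by name: the statement is the Claim_ definition above) =====
theorem correctToNumbers_spec : Claim_equal_correctToNumbers := by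
  intro text _
  unfold Spec_correctToNumbers correctToNumbers correctToNumbers_alt
  congr 1
  have h0 : text.toList.map (pvH (fun _ => false)) = text.toList := by
    have : pvH (fun _ => false) = id := by funext c; simp [pvH]
    rw [this, List.map_id]
  have := loop_inv text.toList 0 (fun _ => false)
    (by intro c h; exact absurd h (by simp)) (by intro j hj hjk; omega)
  rw [h0] at this
  rw [PySem.Chars.len_eq]
  rw [show ((0 : Int)) = ((0 : Nat) : Int) from rfl, this]
  apply List.map_congr_left
  intro c _
  exact (getD_mapping c).symm
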